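-- pv_equiv track=rewrite | github.com/smith-nathanh/ro-agent | ro_agent/tools/handlers/shell.py | extract_base_command
-- ===== SOURCE A (Python) =====
-- def extract_base_command(command: str) -> str | None:
--     """Extract the base command from a shell command string."""
--     # Handle pipes - check first command
--     if "|" in command:
--         command = command.split("|")[0].strip()
--
--     # Handle command chaining - check first command
--     for sep in ["&&", ";", "||"]:
--         if sep in command:
--             command = command.split(sep)[0].strip()
--
--     # Handle env vars at start (VAR=value cmd)
--     parts = command.split()
--     for i, part in enumerate(parts):
--         if "=" not in part:
--             return part
--
--     return parts[0] if parts else None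
-- ===== SOURCE B (Python) =====
-- def extract_base_command(command: str) -> str | None:
--     """Extract the base command from a shell command string.
--
--     Single left-to-right scan: truncate at the earliest pipe/chaining
--     separator, then return the first token that is not a VAR=value
--     assignment (falling back to the first token, or None if empty).
--     """
--     cut = len(command)
--     for i, c in enumerate(command):
--         if c == '|' or c == ';' or (c == '&' and command[i:i + 2] == '&&'):
--             cut = i
--             break
--     parts = command[:cut].split()
--     for part in parts:
--         if '=' not in part:
--             return part
--     return parts[0] if parts else None
-- ===== Notes on version B (the rewrite author's own statement) =====
-- stated objective: alternative
-- what changed: Replaces A's four sequential split-at-separator-and-strip passes by a single left-to-right character scan that truncates at the earliest pipe/chaining separator, followed by one whitespace split.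
import Mathlib
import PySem

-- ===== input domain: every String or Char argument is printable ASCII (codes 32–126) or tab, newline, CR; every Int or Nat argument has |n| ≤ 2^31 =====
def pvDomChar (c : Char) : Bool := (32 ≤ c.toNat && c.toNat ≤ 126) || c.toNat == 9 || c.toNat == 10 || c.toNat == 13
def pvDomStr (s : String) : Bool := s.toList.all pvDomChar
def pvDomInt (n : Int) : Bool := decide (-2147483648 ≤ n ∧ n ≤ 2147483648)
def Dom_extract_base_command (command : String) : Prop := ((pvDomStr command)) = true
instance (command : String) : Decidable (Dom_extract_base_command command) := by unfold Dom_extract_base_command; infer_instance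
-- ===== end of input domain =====

-- B replaces A's sequential split-at-separator-and-strip passes by a single
-- left-to-right scan that truncates at the earliest separator (objective: alternative).

-- ===== PORT A =====
-- one step of A: if sep occurs, keep the part before it and strip it
def aStep (c sep : List Char) : List Char :=
  if PySem.Chars.isIn sep c then PySem.Chars.strip ((PySem.Chars.splitOn c sep).headD []) else c

-- Literal transliteration of A: cut at "|", then the loop over ["&&", ";", "||"]
-- cutting and stripping, split on whitespace, return the first token without '=',
-- else parts[0] / None.
def extract_base_command (command : String) : Option String :=
  let cmd1 := aStep command.toList ['|']
  let cmd2 := [['&','&'], [';'], ['|','|']].foldl aStep cmd1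
  let parts := PySem.Chars.split₀ cmd2
  match parts.find? (fun p => !(PySem.Chars.isIn ['='] p)) with
  | some p => some (String.ofList p)
  | none => parts.head?.map String.ofList

-- ===== PORT B =====
-- B's single scan: keep characters until the first '|', ';' or "&&" (next-char check)
def sepCutB : List Char → List Char
  | [] => []
  | c :: rest =>
    if c == '|' || c == ';' || (c == '&' && rest.head? == some '&') then []
    else c :: sepCutB rest

def extract_base_command_alt (command : String) : Option String :=
  let parts := PySem.Chars.split₀ (sepCutB command.toList)
  match parts.find? (fun p => !(PySem.Chars.isIn ['='] p)) with
  | some p => some (String.ofList p)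
  | none => parts.head?.map String.ofList

-- ===== PRECONDITION & SPEC =====
def Spec_extract_base_command (command : String) (out : Option String) : Prop := out = extract_base_command_alt command
instance (command : String) (out : Option String) : Decidable (Spec_extract_base_command command out) := by unfold Spec_extract_base_command; infer_instance

-- ===== CLAIM (what is proved, stated in full; the proofs are below) =====
def Claim_equal_extract_base_command : Prop := ∀ (command : String), Dom_extract_base_command command → Spec_extract_base_command command (extract_base_command command)

-- ===== LEMMAS AND PROOFS =====

-- chars of s strictly before the first occurrence of sep (the head of s.split(sep))
def aCutGo (sep : List Char) : List Char → List Char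
  | [] => []
  | c :: rest => if sep.isPrefixOf (c :: rest) then [] else c :: aCutGo sep rest

theorem splitOn_go_head (sep : List Char) (hsep : sep ≠ []) :
    ∀ (fuel : Nat) (l cur : List Char) (acc : List (List Char)), l.length < fuel →
      ∃ t, PySem.Chars.splitOn.go sep fuel l cur acc =
        acc.reverse ++ (cur.reverse ++ aCutGo sep l) :: t := by
  intro fuel
  induction fuel with
  | zero => intro l cur acc hl; omega
  | succ n ih =>
    intro l cur acc hl
    match l with
    | [] =>
      refine ⟨[], ?_⟩
      simp [PySem.Chars.splitOn.go, aCutGo]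
    | c :: rest =>
      by_cases hp : sep.isPrefixOf (c :: rest) = true
      · have hlen : (List.drop sep.length (c :: rest)).length < n := by
          have : 1 ≤ sep.length := by
            cases sep with | nil => simp at hsep | cons a s => simp
          simp only [List.length_drop, List.length_cons] at *
          omega
        obtain ⟨t, ht⟩ := ih (List.drop sep.length (c :: rest)) [] (cur.reverse :: acc) hlen
        refine ⟨(aCutGo sep (List.drop sep.length (c :: rest))) :: t, ?_⟩
        simp only [PySem.Chars.splitOn.go, hp, if_pos]
        rw [ht]
        simp [aCutGo, hp]
      · obtain ⟨t, ht⟩ := ih rest (c :: cur) acc (by simpa using Nat.lt_of_succ_lt_succ hl)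
        refine ⟨t, ?_⟩
        simp only [PySem.Chars.splitOn.go, hp]
        rw [ht]
        simp [aCutGo, hp]

theorem splitOn_headD (sep s : List Char) (hsep : sep ≠ []) :
    (PySem.Chars.splitOn s sep).headD [] = aCutGo sep s := by
  obtain ⟨t, ht⟩ := splitOn_go_head sep hsep (s.length + 1) s [] [] (by omega)
  simp [PySem.Chars.splitOn, ht]

theorem mem_aCutGo {sep l : List Char} {c : Char} (h : c ∈ aCutGo sep l) : c ∈ l := by
  induction l with
  | nil => simpa [aCutGo] using h
  | cons a rest ih =>
    by_cases hp : sep.isPrefixOf (a :: rest) = true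
    · simp [aCutGo, hp] at h
    · simp only [aCutGo, hp, if_false, Bool.false_eq_true, List.mem_cons] at h ⊢
      rcases h with h | h
      · exact Or.inl h
      · exact Or.inr (ih h)

theorem pipe_not_mem_aCutGo (l : List Char) : '|' ∉ aCutGo ['|'] l := by
  induction l with
  | nil => simp [aCutGo]
  | cons a rest ih =>
    by_cases hp : ['|'].isPrefixOf (a :: rest) = true
    · simp [aCutGo, hp]
    · have ha : ¬ '|' = a := by
        intro h; rw [← h] at hp; simp [List.isPrefixOf] at hp
      simp only [aCutGo, hp, if_false, Bool.false_eq_true, List.mem_cons, not_or]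
      exact ⟨ha, ih⟩

theorem aCutGo_eq_self {sep l : List Char} (h : ¬ sep <:+: l) : aCutGo sep l = l := by
  induction l with
  | nil => rfl
  | cons a rest ih =>
    have hp : ¬ sep.isPrefixOf (a :: rest) = true := by
      intro hpre
      exact h ((List.isPrefixOf_iff_prefix.mp hpre).isInfix)
    have hrest : ¬ sep <:+: rest := fun hi => h (hi.trans (List.suffix_cons a rest).isInfix)
    simp [aCutGo, hp, ih hrest]

theorem head?_aCutGo_pipe (l : List Char) :
    (aCutGo ['|'] l).head? = if l.head? = some '|' then none else l.head? := by
  cases l with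
  | nil => rfl
  | cons a rest =>
    by_cases ha : a = '|'
    · subst ha; simp [aCutGo, List.isPrefixOf]
    · have ha' : ¬ '|' = a := fun h => ha h.symm
      simp [aCutGo, List.isPrefixOf, ha, ha']

-- A's three effective sequential cuts compose to B's single scan
theorem composite_eq_sepCutB (l : List Char) :
    aCutGo [';'] (aCutGo ['&','&'] (aCutGo ['|'] l)) = sepCutB l := by
  induction l with
  | nil => rfl
  | cons c rest ih =>
    by_cases hpipe : c = '|'
    · subst hpipe
      simp [aCutGo, sepCutB, List.isPrefixOf]
    · by_cases hamp : c = '&' ∧ rest.head? = some '&'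
      · obtain ⟨hc, hh⟩ := hamp
        subst hc
        cases rest with
        | nil => simp at hh
        | cons b r2 =>
          simp only [List.head?_cons, Option.some.injEq] at hh
          subst hh
          simp [aCutGo, sepCutB, List.isPrefixOf]
      · have h1 : aCutGo ['|'] (c :: rest) = c :: aCutGo ['|'] rest := by
          have : ¬ '|' = c := fun h => hpipe h.symm
          simp [aCutGo, List.isPrefixOf, this]
        have h2 : ¬ (['&','&'].isPrefixOf (c :: aCutGo ['|'] rest) = true) := by
          intro hp
          rcases List.isPrefixOf_iff_prefix.mp hp with ⟨t, ht⟩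
          simp only [List.cons_append, List.cons.injEq, List.nil_append] at ht
          obtain ⟨hc, hrest⟩ := ht
          apply hamp
          refine ⟨hc.symm, ?_⟩
          have hhd : (aCutGo ['|'] rest).head? = some '&' := by
            rw [← hrest]; simp
          rw [head?_aCutGo_pipe] at hhd
          split at hhd
          · simp at hhd
          · exact hhd
        have h2' : aCutGo ['&','&'] (aCutGo ['|'] (c :: rest)) =
            c :: aCutGo ['&','&'] (aCutGo ['|'] rest) := by
          rw [h1]; simp [aCutGo, h2]
        by_cases hsemi : c = ';'
        · subst hsemi
          rw [h2']
          simp [aCutGo, sepCutB, List.isPrefixOf]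
        · have hsemi' : ¬ ';' = c := fun h => hsemi h.symm
          rw [h2']
          have hampb : (c == '&' && rest.head? == some '&') = false := by
            by_cases h : c = '&'
            · subst h
              have : ¬ rest.head? = some '&' := fun hh => hamp ⟨rfl, hh⟩
              simp [this]
            · simp [h]
          simp only [aCutGo, List.isPrefixOf, sepCutB, hsemi', hampb]
          simp [hpipe, hsemi, hsemi', ih]

-- split() is blind to surrounding whitespace: the go-level lemmas
theorem split0_go_ws (post : List Char) (h : ∀ c ∈ post, PySem.Chars.isspace c = true) :
    ∀ (cur : List Char) (acc : List (List Char)),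
      PySem.Chars.split₀.go post cur acc = PySem.Chars.split₀.go [] cur acc := by
  induction post with
  | nil => intro cur acc; rfl
  | cons c rest ih =>
    intro cur acc
    have hc : PySem.Chars.isspace c = true := h c (by simp)
    have hrest : ∀ x ∈ rest, PySem.Chars.isspace x = true := fun x hx => h x (by simp [hx])
    by_cases hcur : cur.isEmpty = true
    · simp only [PySem.Chars.split₀.go, hc, if_pos, hcur]
      rw [ih hrest]
      cases cur with
      | nil => rfl
      | cons a b => simp [List.isEmpty] at hcur
    · simp only [PySem.Chars.split₀.go, hc, if_pos, hcur, if_false, Bool.false_eq_true]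
      rw [ih hrest]
      simp [PySem.Chars.split₀.go]

theorem split0_go_append_ws (post : List Char) (h : ∀ c ∈ post, PySem.Chars.isspace c = true) :
    ∀ (x cur : List Char) (acc : List (List Char)),
      PySem.Chars.split₀.go (x ++ post) cur acc = PySem.Chars.split₀.go x cur acc := by
  intro x
  induction x with
  | nil => intro cur acc; simpa using split0_go_ws post h cur acc
  | cons c rest ih =>
    intro cur acc
    by_cases hc : PySem.Chars.isspace c = true
    · simp only [List.cons_append, PySem.Chars.split₀.go, hc, if_pos]
      by_cases hcur : cur.isEmpty = true <;> simp [hcur, ih]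
    · simp only [List.cons_append, PySem.Chars.split₀.go, hc]
      simp [ih]

theorem split0_go_ws_pre (pre : List Char) (h : ∀ c ∈ pre, PySem.Chars.isspace c = true) :
    ∀ (x : List Char) (acc : List (List Char)),
      PySem.Chars.split₀.go (pre ++ x) [] acc = PySem.Chars.split₀.go x [] acc := by
  induction pre with
  | nil => intro x acc; rfl
  | cons c rest ih =>
    intro x acc
    have hc : PySem.Chars.isspace c = true := h c (by simp)
    simp only [List.cons_append, PySem.Chars.split₀.go, hc, if_pos]
    simp [ih (fun y hy => h y (by simp [hy]))]

theorem split0_ws_eq (pre x post : List Char)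
    (hpre : ∀ c ∈ pre, PySem.Chars.isspace c = true)
    (hpost : ∀ c ∈ post, PySem.Chars.isspace c = true) :
    PySem.Chars.split₀ (pre ++ x ++ post) = PySem.Chars.split₀ x := by
  unfold PySem.Chars.split₀
  rw [List.append_assoc, split0_go_ws_pre pre hpre, split0_go_append_ws post hpost]

-- "x is y with some whitespace shaved off both ends"
def wsEq (x y : List Char) : Prop :=
  ∃ pre post, (∀ c ∈ pre, PySem.Chars.isspace c = true) ∧
    (∀ c ∈ post, PySem.Chars.isspace c = true) ∧ y = pre ++ x ++ post

theorem wsEq_refl (x : List Char) : wsEq x x := ⟨[], [], by simp, by simp, by simp⟩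

theorem wsEq_mem {x y : List Char} {c : Char} (h : wsEq x y) (hc : c ∈ x) : c ∈ y := by
  obtain ⟨p, q, _, _, rfl⟩ := h
  simp [hc]

theorem wsEq_trans {x y z : List Char} (h1 : wsEq x y) (h2 : wsEq y z) : wsEq x z := by
  obtain ⟨p1, q1, hp1, hq1, rfl⟩ := h1
  obtain ⟨p2, q2, hp2, hq2, rfl⟩ := h2
  refine ⟨p2 ++ p1, q1 ++ q2, ?_, ?_, by simp⟩
  · intro c hc; rcases List.mem_append.mp hc with h | h
    · exact hp2 c h
    · exact hp1 c h
  · intro c hc; rcases List.mem_append.mp hc with h | h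
    · exact hq1 c h
    · exact hq2 c h

theorem wsEq_split₀ {x y : List Char} (h : wsEq x y) :
    PySem.Chars.split₀ x = PySem.Chars.split₀ y := by
  obtain ⟨p, q, hp, hq, rfl⟩ := h
  exact (split0_ws_eq p x q hp hq).symm

theorem wsEq_strip (y : List Char) : wsEq (PySem.Chars.strip y) y := by
  unfold PySem.Chars.strip PySem.Chars.rstrip PySem.Chars.lstrip
  refine ⟨y.takeWhile PySem.Chars.isspace,
    ((y.dropWhile PySem.Chars.isspace).reverse.takeWhile PySem.Chars.isspace).reverse,
    ?_, ?_, ?_⟩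
  · intro c hc; exact List.mem_takeWhile_imp hc
  · intro c hc
    rw [List.mem_reverse] at hc
    exact List.mem_takeWhile_imp hc
  · have hb : y.dropWhile PySem.Chars.isspace =
        ((y.dropWhile PySem.Chars.isspace).reverse.dropWhile PySem.Chars.isspace).reverse ++
        ((y.dropWhile PySem.Chars.isspace).reverse.takeWhile PySem.Chars.isspace).reverse := by
      conv_lhs => rw [← List.reverse_reverse (y.dropWhile PySem.Chars.isspace),
        ← List.takeWhile_append_dropWhile (p := PySem.Chars.isspace)
          (l := (y.dropWhile PySem.Chars.isspace).reverse)]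
      rw [List.reverse_append]
    conv_lhs => rw [← List.takeWhile_append_dropWhile (p := PySem.Chars.isspace) (l := y), hb]
    simp [List.append_assoc]

theorem isPrefixOf_append_ws :
    ∀ (sep t post : List Char), (∀ c ∈ sep, PySem.Chars.isspace c = false) →
      (∀ c ∈ post, PySem.Chars.isspace c = true) →
      sep.isPrefixOf (t ++ post) = sep.isPrefixOf t := by
  intro sep
  induction sep with
  | nil => intro t post _ _; simp [List.isPrefixOf]
  | cons a s' ih =>
    intro t post hsep hpost
    cases t with
    | nil =>
      cases post with
      | nil => rfl
      | cons p post' =>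
        have hap : ¬ a == p := by
          intro h
          have := hsep a (by simp)
          rw [beq_iff_eq] at h
          subst h
          rw [hpost a (by simp)] at this
          simp at this
        simp [List.isPrefixOf, hap]
    | cons b t' =>
      simp only [List.cons_append, List.isPrefixOf]
      rw [ih t' post (fun c hc => hsep c (by simp [hc])) hpost]

theorem aCutGo_ws_list (sep : List Char) (hne : sep ≠ [])
    (hsep : ∀ c ∈ sep, PySem.Chars.isspace c = false)
    (post : List Char) (hpost : ∀ c ∈ post, PySem.Chars.isspace c = true) :
    aCutGo sep post = post := by
  apply aCutGo_eq_self
  intro hinf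
  cases sep with
  | nil => exact hne rfl
  | cons a s' =>
    have ha : a ∈ post := hinf.subset (by simp)
    have h1 := hsep a (by simp)
    have h2 := hpost a ha
    rw [h1] at h2; simp at h2

theorem aCutGo_append_ws (sep : List Char) (hne : sep ≠ [])
    (hsep : ∀ c ∈ sep, PySem.Chars.isspace c = false)
    (post : List Char) (hpost : ∀ c ∈ post, PySem.Chars.isspace c = true) :
    ∀ t : List Char, aCutGo sep (t ++ post) = aCutGo sep t ∨
      aCutGo sep (t ++ post) = aCutGo sep t ++ post := by
  intro t
  induction t with
  | nil =>
    right
    simpa [aCutGo] using aCutGo_ws_list sep hne hsep post hpost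
  | cons c t' ih =>
    have hfire : sep.isPrefixOf (c :: t' ++ post) = sep.isPrefixOf (c :: t') := by
      simpa using isPrefixOf_append_ws sep (c :: t') post hsep hpost
    by_cases hp : sep.isPrefixOf (c :: t') = true
    · left
      simp only [List.cons_append] at hfire ⊢
      simp [aCutGo, hfire, hp]
    · rcases ih with h | h
      · left
        simp only [List.cons_append] at hfire ⊢
        simp [aCutGo, hfire, hp, h]
      · right
        simp only [List.cons_append] at hfire ⊢
        simp [aCutGo, hfire, hp, h]

theorem aCutGo_ws_pre (sep : List Char) (hne : sep ≠ [])
    (hsep : ∀ c ∈ sep, PySem.Chars.isspace c = false)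
    (pre : List Char) (hpre : ∀ c ∈ pre, PySem.Chars.isspace c = true)
    (x : List Char) :
    aCutGo sep (pre ++ x) = pre ++ aCutGo sep x := by
  induction pre with
  | nil => simp
  | cons p pre' ih =>
    have hnofire : ¬ sep.isPrefixOf (p :: (pre' ++ x)) = true := by
      cases sep with
      | nil => exact absurd rfl hne
      | cons a s' =>
        intro h
        simp only [List.isPrefixOf, Bool.and_eq_true, beq_iff_eq] at h
        obtain ⟨h1, _⟩ := h
        have := hsep a (by simp)
        rw [h1, hpre p (by simp)] at this
        simp at this
    simp only [List.cons_append, aCutGo, hnofire, if_false, Bool.false_eq_true]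
    rw [ih (fun c hc => hpre c (by simp [hc]))]

theorem wsEq_aCutGo (sep : List Char) (hne : sep ≠ [])
    (hsep : ∀ c ∈ sep, PySem.Chars.isspace c = false)
    {x y : List Char} (h : wsEq x y) : wsEq (aCutGo sep x) (aCutGo sep y) := by
  obtain ⟨pre, post, hpre, hpost, rfl⟩ := h
  rw [List.append_assoc, aCutGo_ws_pre sep hne hsep pre hpre]
  rcases aCutGo_append_ws sep hne hsep post hpost x with h | h
  · exact ⟨pre, [], hpre, by simp, by simp [h]⟩
  · exact ⟨pre, post, hpre, hpost, by simp [h]⟩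

-- one step of A tracks one cut of the unstripped pipeline
theorem wsEq_aStep (sep : List Char) (hne : sep ≠ [])
    (hsep : ∀ c ∈ sep, PySem.Chars.isspace c = false)
    {x w : List Char} (h : wsEq x w) : wsEq (aStep x sep) (aCutGo sep w) := by
  have hxw := wsEq_aCutGo sep hne hsep h
  unfold aStep
  by_cases hin : PySem.Chars.isIn sep x = true
  · rw [if_pos hin, splitOn_headD sep x hne]
    exact wsEq_trans (wsEq_strip _) hxw
  · rw [if_neg hin]
    have hx : aCutGo sep x = x :=
      aCutGo_eq_self ((PySem.Chars.isIn_eq_false_iff sep x).mp (Bool.eq_false_iff.mpr hin))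
    rw [hx] at hxw
    exact hxw

theorem main_parts (s : List Char) :
    PySem.Chars.split₀ ([[ '&','&'], [';'], ['|','|']].foldl aStep (aStep s ['|'])) =
    PySem.Chars.split₀ (sepCutB s) := by
  simp only [List.foldl]
  have h1 : wsEq (aStep s ['|']) (aCutGo ['|'] s) :=
    wsEq_aStep _ (by decide) (by intro c hc; fin_cases hc <;> rfl) (wsEq_refl s)
  have h2 : wsEq (aStep (aStep s ['|']) ['&','&'])
      (aCutGo ['&','&'] (aCutGo ['|'] s)) :=
    wsEq_aStep _ (by decide) (by intro c hc; fin_cases hc <;> rfl) h1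
  have h3 : wsEq (aStep (aStep (aStep s ['|']) ['&','&']) [';'])
      (aCutGo [';'] (aCutGo ['&','&'] (aCutGo ['|'] s))) :=
    wsEq_aStep _ (by decide) (by intro c hc; fin_cases hc <;> rfl) h2
  have hnopipe : '|' ∉ aStep (aStep (aStep s ['|']) ['&','&']) [';'] := fun hm =>
    pipe_not_mem_aCutGo s (mem_aCutGo (mem_aCutGo (wsEq_mem h3 hm)))
  have hin : PySem.Chars.isIn ['|','|'] (aStep (aStep (aStep s ['|']) ['&','&']) [';']) = false := by
    rw [PySem.Chars.isIn_eq_false_iff]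
    intro hinf
    exact hnopipe (hinf.subset (by simp))
  have h4 : aStep (aStep (aStep (aStep s ['|']) ['&','&']) [';']) ['|','|'] =
      aStep (aStep (aStep s ['|']) ['&','&']) [';'] := by
    conv_lhs => rw [aStep]
    rw [hin]
    simp
  rw [h4, wsEq_split₀ h3, composite_eq_sepCutB]

-- ===== VERDICT (by name: the statement is the Claim_ definition above) =====
theorem extract_base_command_spec : Claim_equal_extract_base_command := by
  unfold Claim_equal_extract_base_command
  intro command _
  unfold Spec_extract_base_command extract_base_command extract_base_command_alt
  simp only [main_parts]
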